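-- pv_equiv track=rewrite | github.com/BHARATHMUTHYALA/Interesting-Computer-Networks | WEEK 2/character_stuff_check.py | character_stuffing
-- ===== SOURCE A (Python) =====
-- def character_stuffing(data, escape_char = '11110', flag='01111110'):
--     special_chars = {'|', '!','?'}
--     stuffed_data = ''
--     for char in data:
--         if char in special_chars:
--             stuffed_data += escape_char + char
--         else:
--             stuffed_data += char
--     return flag + stuffed_data +  flag
-- ===== SOURCE B (Python) =====
-- def character_stuffing(data, escape_char='11110', flag='01111110'):
--     # Divide and conquer: split on each special char in turn, recurse on the
--     # pieces, and re-join with the escaped separator. No per-character loop.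
--     def stuff(s, specials):
--         if not specials:
--             return s
--         sep = specials[0]
--         return (escape_char + sep).join(stuff(part, specials[1:]) for part in s.split(sep))
--     return flag + stuff(data, '|!?') + flag
-- ===== Notes on version B (the rewrite author's own statement) =====
-- stated objective: alternative
-- what changed: Replaces A's per-character accumulator loop by a divide-and-conquer recursion over the special characters: split the string on each special char in turn, recurse on the pieces, and re-join them with the escaped separator.
import Mathlib
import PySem

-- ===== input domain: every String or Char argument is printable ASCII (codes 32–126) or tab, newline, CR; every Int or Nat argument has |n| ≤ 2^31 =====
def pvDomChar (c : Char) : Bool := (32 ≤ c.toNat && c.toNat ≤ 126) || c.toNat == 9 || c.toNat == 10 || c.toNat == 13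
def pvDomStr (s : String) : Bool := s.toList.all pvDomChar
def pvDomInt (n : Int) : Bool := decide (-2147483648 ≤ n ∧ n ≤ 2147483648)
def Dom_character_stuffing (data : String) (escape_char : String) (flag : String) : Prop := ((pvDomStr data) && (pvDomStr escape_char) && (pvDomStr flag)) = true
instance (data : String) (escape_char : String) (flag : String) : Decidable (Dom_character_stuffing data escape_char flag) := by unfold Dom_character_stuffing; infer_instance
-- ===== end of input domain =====

-- B replaces A's per-character accumulator loop by a divide-and-conquer recursion over
-- the special characters: split on each special char in turn, recurse on the pieces,
-- and re-join them with the escaped separator (objective: alternative algorithm).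

-- ===== PORT A =====
-- literal port: set of special chars, accumulator loop over the characters
def character_stuffing (data : String) (escape_char : String) (flag : String) : String :=
  let special_chars : PySem.Set Char := PySem.Set.ofList ['|', '!', '?']
  let stuffed_data : String :=
    data.toList.foldl
      (fun stuffed char =>
        if special_chars.contains char then
          stuffed ++ (escape_char ++ String.ofList [char])
        else
          stuffed ++ String.ofList [char]) ""
  flag ++ stuffed_data ++ flag

-- ===== PORT B =====
-- literal port of Source B's inner 'stuff': recursion over the remaining specials;
-- s.split(sep) for the single-char sep is PySem.Chars.splitOn (the sep ≠ "" form),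
-- the join is PySem.Str.join
def character_stuffing_alt.stuff (escape_char : String) : String → List Char → String
  | s, [] => s
  | s, sep :: rest =>
      PySem.Str.join (escape_char ++ String.ofList [sep])
        ((PySem.Chars.splitOn s.toList [sep]).map
          (fun part => character_stuffing_alt.stuff escape_char (String.ofList part) rest))

def character_stuffing_alt (data : String) (escape_char : String) (flag : String) : String :=
  flag ++ character_stuffing_alt.stuff escape_char data "|!?".toList ++ flag

-- ===== PRECONDITION & SPEC =====
def Spec_character_stuffing (data : String) (escape_char : String) (flag : String) (out : String) : Prop := out = character_stuffing_alt data escape_char flag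
instance (data : String) (escape_char : String) (flag : String) (out : String) : Decidable (Spec_character_stuffing data escape_char flag out) := by unfold Spec_character_stuffing; infer_instance

-- ===== CLAIM (what is proved, stated in full; the proofs are below) =====
def Claim_equal_character_stuffing : Prop := ∀ (data : String) (escape_char : String) (flag : String), Dom_character_stuffing data escape_char flag → Spec_character_stuffing data escape_char flag (character_stuffing data escape_char flag)

-- ===== LEMMAS AND PROOFS =====

-- the per-character replacement, relative to a list of special chars still to handle
def pvRepl (e : List Char) (specials : List Char) (c : Char) : List Char :=
  if c ∈ specials then e ++ [c] else [c]

-- A's loop equals the flatMap of pvRepl over all three specials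
lemma pvSet_contains (c : Char) :
    (PySem.Set.ofList ['|', '!', '?'] : PySem.Set Char).contains c
      = decide (c ∈ (['|', '!', '?'] : List Char)) := by
  by_cases h1 : c = '|'
  · subst h1; decide
  · by_cases h2 : c = '!'
    · subst h2; decide
    · by_cases h3 : c = '?'
      · subst h3; decide
      · simp [PySem.Set.ofList, PySem.Set.contains, PySem.Set.add, h1, h2, h3]

lemma pvFoldl_eq (e : String) (l : List Char) (acc : String) :
    l.foldl
      (fun stuffed char =>
        if (PySem.Set.ofList ['|', '!', '?'] : PySem.Set Char).contains char then
          stuffed ++ (e ++ String.ofList [char])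
        else
          stuffed ++ String.ofList [char]) acc
    = acc ++ String.ofList (l.flatMap (pvRepl e.toList ['|', '!', '?'])) := by
  induction l generalizing acc with
  | nil => simp
  | cons c l ih =>
    simp only [List.foldl_cons, List.flatMap_cons, ih, pvRepl, pvSet_contains]
    split_ifs with h <;> simp_all [String.ext_iff]

lemma pvModifyHead_id {α : Type} (l : List (List α)) : List.modifyHead (fun x => x) l = l := by
  cases l <;> rfl

lemma pvSplitOn_ne_nil (c : Char) (l : List Char) : List.splitOn c l ≠ [] := by
  simp [List.splitOn]; exact List.splitOnP_ne_nil _ _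

lemma pvSplitOn_cons (c a : Char) (l : List Char) :
    List.splitOn c (a :: l)
      = if a = c then [] :: List.splitOn c l
        else (List.splitOn c l).modifyHead (a :: ·) := by
  simp only [List.splitOn, List.splitOnP_cons, beq_iff_eq]

-- PySem.Chars.splitOn with a single-character separator is Mathlib's List.splitOn
lemma pvGo_eq (c : Char) : ∀ (fuel : Nat) (l cur : List Char) (acc : List (List Char)),
    l.length < fuel →
    PySem.Chars.splitOn.go [c] fuel l cur acc
      = acc.reverse ++ (List.splitOn c l).modifyHead (cur.reverse ++ ·) := by
  intro fuel
  induction fuel with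
  | zero => intro l cur acc h; omega
  | succ fuel ih =>
    intro l cur acc h
    cases l with
    | nil =>
      simp [PySem.Chars.splitOn.go, List.splitOn]
    | cons a l =>
      by_cases hac : a = c
      · subst hac
        have hpre : List.isPrefixOf [a] (a :: l) = true := by
          simp [List.isPrefixOf]
        rw [PySem.Chars.splitOn.go]
        simp only [hpre]
        rw [ih _ _ _ (by simpa using Nat.lt_of_succ_lt_succ h)]
        simp [pvSplitOn_cons, pvModifyHead_id]
      · have hpre : List.isPrefixOf [c] (a :: l) = false := by
          simp [List.isPrefixOf, Ne.symm hac]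
        rw [PySem.Chars.splitOn.go]
        rw [if_neg (by simp [hpre])]
        rw [ih _ _ _ (by simpa using Nat.lt_of_succ_lt_succ h)]
        obtain ⟨hd, tl, hht⟩ := List.exists_cons_of_ne_nil (pvSplitOn_ne_nil c l)
        simp [pvSplitOn_cons, hac, hht]

lemma pvSplitOn_eq (c : Char) (l : List Char) :
    PySem.Chars.splitOn l [c] = List.splitOn c l := by
  rw [PySem.Chars.splitOn, pvGo_eq c _ _ _ _ (by omega)]
  obtain ⟨hd, tl, hht⟩ := List.exists_cons_of_ne_nil (pvSplitOn_ne_nil c l)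
  simp [hht]

lemma pvIntercalate_prepend (j p q : List Char) (X : List (List Char)) :
    j.intercalate ((p ++ q) :: X) = p ++ j.intercalate (q :: X) := by
  cases X <;> simp [List.intercalate, List.intersperse]

-- joining the per-segment images with j re-creates the flatMap where c maps to j
lemma pvJoin_eq (c : Char) (j : List Char) (f : Char → List Char) (l : List Char) :
    (j.intercalate ((List.splitOn c l).map (fun p => p.flatMap f)))
      = l.flatMap (fun x => if x = c then j else f x) := by
  induction l with
  | nil => simp [List.splitOn, List.intercalate]
  | cons a l ih =>
    obtain ⟨hd, tl, hht⟩ := List.exists_cons_of_ne_nil (pvSplitOn_ne_nil c l)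
    by_cases hac : a = c
    · subst hac
      rw [hht, List.map_cons] at ih
      rw [pvSplitOn_cons, if_pos rfl, hht]
      simp only [List.map_cons, List.flatMap_nil]
      rw [show (j.intercalate ([] :: List.flatMap f hd ::
            List.map (fun p => p.flatMap f) tl))
          = [] ++ (j ++ j.intercalate (List.flatMap f hd ::
            List.map (fun p => p.flatMap f) tl)) from by
        simp [List.intercalate, List.intersperse]]
      rw [ih, List.flatMap_cons, if_pos rfl]
      simp
    · rw [pvSplitOn_cons, if_neg hac, hht, List.modifyHead_cons, List.map_cons,
        show (a :: hd).flatMap f = f a ++ hd.flatMap f from by simp,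
        pvIntercalate_prepend, List.flatMap_cons, if_neg hac]
      rw [hht, List.map_cons] at ih
      rw [ih]

-- B's recursion computes the flatMap of pvRepl over the remaining specials
lemma pvStuff_eq (e : String) (specials : List Char) : ∀ (s : String),
    character_stuffing_alt.stuff e s specials
      = String.ofList (s.toList.flatMap (pvRepl e.toList specials)) := by
  induction specials with
  | nil =>
    intro s
    have hid : pvRepl e.toList [] = fun x => [x] := funext fun x => by simp [pvRepl]
    simp [character_stuffing_alt.stuff, hid]
  | cons c rest ih =>
    intro s
    rw [character_stuffing_alt.stuff]
    have hmap : (PySem.Chars.splitOn s.toList [c]).map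
        (fun part => character_stuffing_alt.stuff e (String.ofList part) rest)
      = (List.splitOn c s.toList).map
          (fun part => String.ofList (part.flatMap (pvRepl e.toList rest))) := by
      rw [pvSplitOn_eq]
      exact List.map_congr_left (fun p _ => by rw [ih]; simp)
    rw [hmap, PySem.Str.join]
    have hlists : (List.map String.toList
        ((List.splitOn c s.toList).map
          (fun part => String.ofList (part.flatMap (pvRepl e.toList rest)))))
      = (List.splitOn c s.toList).map (fun p => p.flatMap (pvRepl e.toList rest)) := by
      simp
    rw [PySem.Chars.join, hlists]
    have hj : (e ++ String.ofList [c]).toList = e.toList ++ [c] := by simp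
    rw [hj, pvJoin_eq]
    have hfun : (fun x => if x = c then e.toList ++ [c] else pvRepl e.toList rest x)
        = pvRepl e.toList (c :: rest) := by
      funext x
      by_cases hx : x = c
      · subst hx; simp [pvRepl]
      · simp [pvRepl, hx]
    rw [hfun]

-- ===== VERDICT (by name: the statement is the Claim_ definition above) =====
theorem character_stuffing_spec : Claim_equal_character_stuffing := by
  intro data e flag _
  show _ = _
  simp only [character_stuffing, character_stuffing_alt, pvFoldl_eq, pvStuff_eq]
  simp
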